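-- pv_equiv track=rewrite | github.com/quangdang46/verse-mcp | scripts/build_docs_db.py | strip_trailing_search_tags
-- ===== SOURCE A (Python) =====
-- SEARCH_TAG_FRAGMENT = "community/search?query="
--
-- def strip_trailing_search_tags(lines: list[str]) -> list[str]:
--     end = len(lines)
--     while end > 0 and not lines[end - 1].strip():
--         end -= 1
--
--     candidate = end
--     while candidate > 0:
--         stripped = lines[candidate - 1].strip()
--         if not stripped or SEARCH_TAG_FRAGMENT in lines[candidate - 1]:
--             candidate -= 1
--             continue
--         break
--
--     if candidate < end and any(SEARCH_TAG_FRAGMENT in line for line in lines[candidate:end]):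
--         return lines[:candidate]
--     return lines[:end]
-- ===== SOURCE B (Python) =====
-- SEARCH_TAG_FRAGMENT = "community/search?query="
--
--
-- def strip_trailing_search_tags(lines: list[str]) -> list[str]:
--     # Single forward pass: keep everything up to (and including) the last line
--     # that is non-blank and does not contain the search-tag fragment.
--     keep = 0
--     for i, line in enumerate(lines):
--         if line.strip() and SEARCH_TAG_FRAGMENT not in line:
--             keep = i + 1
--     return lines[:keep]
-- ===== Notes on version B (the rewrite author's own statement) =====
-- stated objective: simpler
-- what changed: Replaced the two backward while-loops plus the any() re-scan of the slice by one forward pass that records 1 + the index of the last line that is non-blank and lacks the fragment, exploiting that A's any() test is always true whenever candidate < end.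
import Mathlib
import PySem

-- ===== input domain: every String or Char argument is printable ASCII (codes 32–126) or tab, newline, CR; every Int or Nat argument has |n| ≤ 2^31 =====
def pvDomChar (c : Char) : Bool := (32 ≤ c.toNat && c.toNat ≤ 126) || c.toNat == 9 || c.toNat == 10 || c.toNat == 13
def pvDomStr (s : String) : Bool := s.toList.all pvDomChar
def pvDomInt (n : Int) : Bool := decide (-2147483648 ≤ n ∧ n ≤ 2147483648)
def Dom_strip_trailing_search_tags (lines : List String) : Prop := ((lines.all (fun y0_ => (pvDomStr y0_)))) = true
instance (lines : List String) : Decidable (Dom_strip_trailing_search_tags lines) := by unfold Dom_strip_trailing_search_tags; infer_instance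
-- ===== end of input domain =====

-- B replaces A's two backward scans + any() re-scan by one forward pass; objective: simpler (same asymptotic cost).

def pvFrag : String := "community/search?query="

-- 'not s.strip()' (exact: Chars.strip on .toList is the PySem bridge for str.strip)
def pvBlank (s : String) : Bool := (PySem.Chars.strip s.toList).isEmpty

-- ===== PORT A =====
-- 'while end > 0 and not lines[end-1].strip(): end -= 1' as countdown recursion
def pvFindEnd (lines : List String) : Nat → Nat
  | 0 => 0
  | e + 1 => if pvBlank (lines.getD e "") then pvFindEnd lines e else e + 1

-- 'while candidate > 0: … blank or fragment in line → candidate -= 1 else break'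
def pvFindCand (lines : List String) : Nat → Nat
  | 0 => 0
  | c + 1 =>
    if pvBlank (lines.getD c "") || PySem.Str.isIn pvFrag (lines.getD c "") then
      pvFindCand lines c
    else c + 1

def strip_trailing_search_tags (lines : List String) : List String :=
  let e := pvFindEnd lines lines.length
  let c := pvFindCand lines e
  if c < e ∧ (PySem.List.slice lines (some (c : Int)) (some (e : Int))).any
      (fun line => PySem.Str.isIn pvFrag line) then
    PySem.List.slice lines none (some (c : Int))
  else
    PySem.List.slice lines none (some (e : Int))

-- ===== PORT B =====
def strip_trailing_search_tags_alt (lines : List String) : List String :=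
  let keep := (PySem.List.enumerate lines).foldl
    (fun acc p =>
      if ¬ pvBlank p.2 && ¬ PySem.Str.isIn pvFrag p.2 then p.1 + 1 else acc) (0 : Int)
  PySem.List.slice lines none (some keep)

-- ===== PRECONDITION & SPEC =====
def Spec_strip_trailing_search_tags (lines : List String) (out : List String) : Prop := out = strip_trailing_search_tags_alt lines
instance (lines : List String) (out : List String) : Decidable (Spec_strip_trailing_search_tags lines out) := by unfold Spec_strip_trailing_search_tags; infer_instance

-- ===== CLAIM (what is proved, stated in full; the proofs are below) =====
def Claim_equal_strip_trailing_search_tags : Prop := ∀ (lines : List String), Dom_strip_trailing_search_tags lines → Spec_strip_trailing_search_tags lines (strip_trailing_search_tags lines)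

-- ===== LEMMAS AND PROOFS =====

theorem pvFindEnd_le (lines : List String) (n : Nat) : pvFindEnd lines n ≤ n := by
  induction n with
  | zero => simp [pvFindEnd]
  | succ e ih => simp only [pvFindEnd]; split <;> omega

theorem pvFindCand_le (lines : List String) (n : Nat) : pvFindCand lines n ≤ n := by
  induction n with
  | zero => simp [pvFindCand]
  | succ c ih => simp only [pvFindCand]; split <;> omega

-- stripping trailing blanks first does not change where the candidate scan stops
theorem pvFindCand_findEnd (lines : List String) (n : Nat) :
    pvFindCand lines (pvFindEnd lines n) = pvFindCand lines n := by
  induction n with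
  | zero => rfl
  | succ e ih =>
    by_cases hb : pvBlank (lines.getD e "") = true
    · have h1 : pvFindEnd lines (e + 1) = pvFindEnd lines e := by
        simp only [pvFindEnd]; rw [if_pos hb]
      have h2 : pvFindCand lines (e + 1) = pvFindCand lines e := by
        simp only [pvFindCand]; rw [if_pos (by rw [hb]; simp)]
      rw [h1, h2, ih]
    · have h1 : pvFindEnd lines (e + 1) = e + 1 := by
        simp only [pvFindEnd]; rw [if_neg hb]
      rw [h1]

theorem pvFindEnd_stop (lines : List String) (n : Nat)
    (h : 0 < pvFindEnd lines n) :
    pvBlank (lines.getD (pvFindEnd lines n - 1) "") = false := by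
  induction n with
  | zero => simp [pvFindEnd] at h
  | succ e ih =>
    by_cases hb : pvBlank (lines.getD e "") = true
    · have h1 : pvFindEnd lines (e + 1) = pvFindEnd lines e := by
        simp only [pvFindEnd]; rw [if_pos hb]
      rw [h1] at h ⊢
      exact ih h
    · have h1 : pvFindEnd lines (e + 1) = e + 1 := by
        simp only [pvFindEnd]; rw [if_neg hb]
      rw [h1]
      simpa using hb
  
theorem pvFindCand_lt (lines : List String) (e : Nat)
    (h : pvFindCand lines e < e) :
    (pvBlank (lines.getD (e - 1) "") || PySem.Str.isIn pvFrag (lines.getD (e - 1) "")) = true := by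
  cases e with
  | zero => simp at h
  | succ c =>
    by_cases hb : (pvBlank (lines.getD c "") || PySem.Str.isIn pvFrag (lines.getD c "")) = true
    · simpa using hb
    · simp only [pvFindCand] at h
      rw [if_neg hb] at h
      omega

-- A's result is always the prefix up to the candidate cut
theorem pvA_eq_take (lines : List String) :
    strip_trailing_search_tags lines = lines.take (pvFindCand lines lines.length) := by
  unfold strip_trailing_search_tags
  simp only
  rw [pvFindCand_findEnd]
  set e := pvFindEnd lines lines.length with he
  set c := pvFindCand lines lines.length with hc
  have hce : c = pvFindCand lines e := by rw [he, pvFindCand_findEnd]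
  have hle : e ≤ lines.length := pvFindEnd_le lines lines.length
  have hcle : c ≤ e := hce ▸ pvFindCand_le lines e
  rw [PySem.List.slice_to_natCast, PySem.List.slice_to_natCast]
  by_cases hlt : c < e
  · have hpos : 0 < e := Nat.lt_of_le_of_lt (Nat.zero_le _) hlt
    have hnb : pvBlank (lines.getD (e - 1) "") = false := pvFindEnd_stop lines lines.length hpos
    have htag : PySem.Str.isIn pvFrag (lines.getD (e - 1) "") = true := by
      have h2 := pvFindCand_lt lines e (hce ▸ hlt)
      rw [hnb, Bool.false_or] at h2
      exact h2
    have hidx : e - 1 < lines.length := by omega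
    have hmem : lines.getD (e - 1) "" ∈ PySem.List.slice lines (some (c : Int)) (some (e : Int)) := by
      rw [PySem.List.slice_natCast]
      have hgl : e - 1 - c < ((lines.drop c).take (e - c)).length := by
        simp [List.length_take, List.length_drop]; omega
      have hgd : ((lines.drop c).take (e - c))[e - 1 - c]'hgl = lines.getD (e - 1) "" := by
        rw [List.getElem_take, List.getElem_drop]
        rw [List.getD_eq_getElem lines "" (by omega)]
        congr 1
        omega
      rw [← hgd]
      exact List.getElem_mem _
    have hany : (PySem.List.slice lines (some (c : Int)) (some (e : Int))).any
        (fun line => PySem.Str.isIn pvFrag line) = true :=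
      List.any_eq_true.mpr ⟨_, hmem, htag⟩
    rw [if_pos ⟨hlt, hany⟩]
  · have hceq : c = e := by omega
    rw [if_neg (by intro h; exact hlt h.1), hceq]

-- getD below the old length is unchanged by appending
theorem pvGetD_append (lines : List String) (x : String) (i : Nat) (h : i < lines.length) :
    (lines ++ [x]).getD i "" = lines.getD i "" := by
  rw [List.getD_eq_getElem _ _ (by simp; omega), List.getD_eq_getElem _ _ h,
    List.getElem_append_left h]

theorem pvFindCand_append (lines : List String) (x : String) (m : Nat) (h : m ≤ lines.length) :
    pvFindCand (lines ++ [x]) m = pvFindCand lines m := by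
  induction m with
  | zero => rfl
  | succ c ih =>
    simp only [pvFindCand]
    rw [pvGetD_append lines x c (by omega), ih (by omega)]

-- B's forward fold computes the candidate cut from the full length
theorem pvFold_eq_findCand (lines : List String) :
    (PySem.List.enumerate lines).foldl
      (fun acc p =>
        if ¬ pvBlank p.2 && ¬ PySem.Str.isIn pvFrag p.2 then p.1 + 1 else acc) (0 : Int)
      = ((pvFindCand lines lines.length : Nat) : Int) := by
  induction lines using List.reverseRecOn with
  | nil => rfl
  | append_singleton lines x ih =>
    rw [PySem.List.enumerate_append, List.foldl_append]
    rw [PySem.List.enumerate_cons, PySem.List.enumerate_nil]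
    simp only [List.foldl_cons, List.foldl_nil, ih]
    have hlen : (lines ++ [x]).length = lines.length + 1 := by simp
    rw [hlen]
    simp only [pvFindCand]
    have hx : (lines ++ [x]).getD lines.length "" = x := by
      rw [List.getD_eq_getElem _ _ (by simp)]
      simp
    rw [hx, pvFindCand_append lines x lines.length (le_refl _)]
    by_cases hg : (¬ pvBlank x && ¬ PySem.Str.isIn pvFrag x) = true
    · have hcond : (pvBlank x || PySem.Str.isIn pvFrag x) = true → False := by
        cases hpb : pvBlank x <;> cases hpt : PySem.Str.isIn pvFrag x <;> simp_all
      rw [if_pos hg, if_neg hcond]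
      push_cast
      ring
    · have hcond : (pvBlank x || PySem.Str.isIn pvFrag x) = true := by
        cases hpb : pvBlank x <;> cases hpt : PySem.Str.isIn pvFrag x <;> simp_all
      rw [if_neg hg, if_pos hcond]

-- ===== VERDICT (by name: the statement is the Claim_ definition above) =====
theorem strip_trailing_search_tags_spec : Claim_equal_strip_trailing_search_tags := by
  intro lines _
  unfold Spec_strip_trailing_search_tags strip_trailing_search_tags_alt
  simp only
  rw [pvFold_eq_findCand, PySem.List.slice_to_natCast, ← pvA_eq_take]
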